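-- pv_equiv track=rewrite | github.com/hugehoo/problem-solving | 2022-03/31MAR 디스크컨트롤러.py | solution
-- ===== SOURCE A (Python) =====
-- import heapq
--
-- def solution(jobs):
--     result = []
--     heap = []
--     answer = []
--     for j in jobs:
--         heapq.heappush(heap, j)
--
--     # 가장 먼저 시작하는 녀석을 찾자.
--     first = heapq.heappop(heap)
--     result.append(first[1])
--     answer.append(first[1])
--     # heapq 에서 2개를 꺼내본다.
--     # 비교를 한다. 어떻게? result[-1] + pops[-1] + (result[-1] - pops[0])
--     while len(heap) >= 2:
--         pops1 = heapq.heappop(heap)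
--         pops2 = heapq.heappop(heap)
--         a = sum(result) + pops1[-1] - pops1[0]
--         b = sum(result) + pops2[-1] - pops2[0]
--         if a < b:
--             heapq.heappush(heap, pops2)
--             result.append(pops1[-1])
--             answer.append(a)
--         else:
--             heapq.heappush(heap, pops1)
--             result.append(pops2[-1])
--             answer.append(b)
--     if heap:
--         pops1 = heapq.heappop(heap)
--         a = sum(result) + pops1[-1] - pops1[0]
--         answer.append(a)
--         result.append(pops1[-1])
--
--     return sum(answer) // len(answer)
-- ===== SOURCE B (Python) =====
-- def solution(jobs):
--     pool = list(jobs)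
--     result = []
--     answer = []
--     best = pool[0]
--     for j in pool:
--         if j < best:
--             best = j
--     pool.remove(best)
--     result.append(best[1])
--     answer.append(best[1])
--     while len(pool) >= 2:
--         pops1 = pool[0]
--         for j in pool:
--             if j < pops1:
--                 pops1 = j
--         pool.remove(pops1)
--         pops2 = pool[0]
--         for j in pool:
--             if j < pops2:
--                 pops2 = j
--         pool.remove(pops2)
--         a = sum(result) + pops1[-1] - pops1[0]
--         b = sum(result) + pops2[-1] - pops2[0]
--         if a < b:
--             pool.append(pops2)
--             result.append(pops1[-1])
--             answer.append(a)
--         else: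
--             pool.append(pops1)
--             result.append(pops2[-1])
--             answer.append(b)
--     if pool:
--         pops1 = pool[0]
--         a = sum(result) + pops1[-1] - pops1[0]
--         answer.append(a)
--         result.append(pops1[-1])
--     return sum(answer) // len(answer)
-- ===== Notes on version B (the rewrite author's own statement) =====
-- stated objective: simpler
-- what changed: Replaces the heapq priority queue by a plain list kept in arrival order: each step finds the minimum job by a linear scan seeded with pool[0] and removes it with list.remove, re-appending the losing candidate, so the heapq import and all heap bookkeeping disappear.
import Mathlib
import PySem

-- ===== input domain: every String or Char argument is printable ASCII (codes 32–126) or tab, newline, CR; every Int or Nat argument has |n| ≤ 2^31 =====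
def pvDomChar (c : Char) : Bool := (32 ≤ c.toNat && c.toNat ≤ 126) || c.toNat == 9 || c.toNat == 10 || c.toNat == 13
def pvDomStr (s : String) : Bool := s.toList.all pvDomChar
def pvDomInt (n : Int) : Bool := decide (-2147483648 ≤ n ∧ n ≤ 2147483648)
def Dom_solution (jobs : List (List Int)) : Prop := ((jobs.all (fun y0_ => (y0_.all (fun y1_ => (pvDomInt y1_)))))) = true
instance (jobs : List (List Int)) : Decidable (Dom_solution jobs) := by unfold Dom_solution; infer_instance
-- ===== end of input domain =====

-- B replaces A's heapq priority queue by a plain list scanned linearly for its minimum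
-- (objective: simpler — no heap bookkeeping, no heapq import).

-- ===== PORT A =====
-- heapq is not a PySem primitive; the heap is ported by the sorted list of its contents:
-- heappush inserts in order, heappop takes the head.  This is behaviourally exact:
-- heappop returns the minimum value of the heap, and Python's '<' on lists of ints is
-- Lean's '<' on List Int (lexicographic).
def heapPush (heap : List (List Int)) (j : List Int) : List (List Int) :=
  List.orderedInsert (· ≤ ·) j heap

-- the 'while len(heap) >= 2' loop of A; returns (heap, result, answer)
def loopA : List (List Int) → List Int → List Int → List (List Int) × List Int × List Int
  | pops1 :: pops2 :: rest, result, answer =>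
    let a := result.sum + (PySem.List.pyGet? pops1 (-1)).getD 0 - (PySem.List.pyGet? pops1 0).getD 0
    let b := result.sum + (PySem.List.pyGet? pops2 (-1)).getD 0 - (PySem.List.pyGet? pops2 0).getD 0
    if a < b then
      loopA (heapPush rest pops2) (result ++ [(PySem.List.pyGet? pops1 (-1)).getD 0]) (answer ++ [a])
    else
      loopA (heapPush rest pops1) (result ++ [(PySem.List.pyGet? pops2 (-1)).getD 0]) (answer ++ [b])
  | [], result, answer => ([], result, answer)
  | [pops1], result, answer => ([pops1], result, answer)
  termination_by heap _ _ => heap.length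
  decreasing_by
    all_goals simp [heapPush, List.orderedInsert_length]

def solution (jobs : List (List Int)) : Int :=
  let heap := jobs.foldl heapPush []
  match heap with
  | [] => 0  -- heapq.heappop on the empty heap raises IndexError: outside Pre_solution
  | first :: heap =>
    let fv := (PySem.List.pyGet? first 1).getD 0   -- first[1]; IndexError outside Pre_solution
    match loopA heap [fv] [fv] with
    | (heap, result, answer) =>
      let answer := match heap with
        | pops1 :: _ =>
            answer ++ [result.sum + (PySem.List.pyGet? pops1 (-1)).getD 0 - (PySem.List.pyGet? pops1 0).getD 0]
        | [] => answer
      PySem.Int.floordiv answer.sum (answer.length : Int)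

-- ===== PORT B =====
-- 'pops = pool[0]; for j in pool: if j < pops: pops = j'
def scanMin (pool : List (List Int)) : List Int :=
  match pool with
  | [] => []   -- Source B: pool[0] raises IndexError here (outside Pre_solution)
  | b :: rest => rest.foldl (fun best j => if j < best then j else best) b

-- 'pool.remove(x)'
def removeFirst (pool : List (List Int)) (x : List Int) : List (List Int) :=
  (PySem.List.remove? pool x).getD pool

theorem scanMin_mem_aux (rest : List (List Int)) :
    ∀ b : List Int, rest.foldl (fun best j => if j < best then j else best) b ∈ b :: rest := by
  induction rest with
  | nil => intro b; simp
  | cons j rest ih =>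
    intro b
    have h := ih (if j < b then j else b)
    simp only [List.foldl_cons]
    rcases List.mem_cons.1 h with h' | h'
    · rw [h']; split <;> simp
    · simp [h']

theorem scanMin_mem (pool : List (List Int)) (h : pool ≠ []) : scanMin pool ∈ pool := by
  cases pool with
  | nil => exact absurd rfl h
  | cons b rest => exact scanMin_mem_aux rest b

theorem removeFirst_length (pool : List (List Int)) (x : List Int) (h : x ∈ pool) :
    (removeFirst pool x).length + 1 = pool.length := by
  have hp : 0 < pool.length := List.length_pos_of_mem h
  rw [removeFirst, PySem.List.remove?_eq_some_erase _ _ h]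
  simp [List.length_erase_of_mem h]
  omega

-- the 'while len(pool) >= 2' loop of Source B; returns (pool, result, answer)
def loopB (pool : List (List Int)) (result answer : List Int) :
    List (List Int) × List Int × List Int :=
  if hc : 2 ≤ pool.length then
    let pops1 := scanMin pool
    let pool1 := removeFirst pool pops1
    let pops2 := scanMin pool1
    let pool2 := removeFirst pool1 pops2
    let a := result.sum + (PySem.List.pyGet? pops1 (-1)).getD 0 - (PySem.List.pyGet? pops1 0).getD 0
    let b := result.sum + (PySem.List.pyGet? pops2 (-1)).getD 0 - (PySem.List.pyGet? pops2 0).getD 0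
    if a < b then
      loopB (pool2 ++ [pops2]) (result ++ [(PySem.List.pyGet? pops1 (-1)).getD 0]) (answer ++ [a])
    else
      loopB (pool2 ++ [pops1]) (result ++ [(PySem.List.pyGet? pops2 (-1)).getD 0]) (answer ++ [b])
  else (pool, result, answer)
  termination_by pool.length
  decreasing_by
    all_goals {
      have h1 : scanMin pool ∈ pool := scanMin_mem pool (by intro h; simp [h] at hc)
      have l1 := removeFirst_length pool (scanMin pool) h1
      have h2 : scanMin (removeFirst pool (scanMin pool)) ∈ removeFirst pool (scanMin pool) :=
        scanMin_mem _ (by intro h; rw [h] at l1; simp at l1; omega)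
      have l2 := removeFirst_length _ _ h2
      simp only [List.length_append, List.length_cons, List.length_nil]
      omega }

def solution_alt (jobs : List (List Int)) : Int :=
  match jobs with
  | [] => 0   -- Source B: pool[0] raises IndexError on the empty list (outside Pre_solution)
  | _ :: _ =>
    let best := scanMin jobs
    let pool := removeFirst jobs best
    let bv := (PySem.List.pyGet? best 1).getD 0   -- best[1]
    match loopB pool [bv] [bv] with
    | (pool, result, answer) =>
      let answer := match pool with
        | pops1 :: _ =>
            answer ++ [result.sum + (PySem.List.pyGet? pops1 (-1)).getD 0 - (PySem.List.pyGet? pops1 0).getD 0]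
        | [] => answer
      PySem.Int.floordiv answer.sum (answer.length : Int)

-- ===== PRECONDITION & SPEC =====
-- Exactly where the Python A returns: jobs is nonempty and its lexicographic minimum has
-- at least two entries (otherwise heappop or first[1] raises IndexError).
def Pre_solution (jobs : List (List Int)) : Prop :=
  ∃ m ∈ jobs, 2 ≤ m.length ∧ ∀ j ∈ jobs, m ≤ j
instance (jobs : List (List Int)) : Decidable (Pre_solution jobs) := by
  unfold Pre_solution; infer_instance

def pvWitness_solution : List (List Int) := [[0, 3], [1, 9], [2, 6]]

def Spec_solution (jobs : List (List Int)) (out : Int) : Prop := out = solution_alt jobs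
instance (jobs : List (List Int)) (out : Int) : Decidable (Spec_solution jobs out) := by
  unfold Spec_solution; infer_instance

-- ===== CLAIM (what is proved, stated in full; the proofs are below) =====
def Claim_equal_solution : Prop :=
  ∀ (jobs : List (List Int)), Dom_solution jobs → Pre_solution jobs →
    Spec_solution jobs (solution jobs)

-- ===== LEMMAS AND PROOFS =====

theorem scanMin_le_aux (rest : List (List Int)) :
    ∀ b : List Int, ∀ x ∈ b :: rest,
      rest.foldl (fun best j => if j < best then j else best) b ≤ x := by
  induction rest with
  | nil => intro b x hx; simp at hx; simp [hx]
  | cons j rest ih =>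
    intro b x hx
    simp only [List.foldl_cons]
    have hcb : (if j < b then j else b) ≤ b := by split <;> [exact le_of_lt ‹_›; exact le_refl _]
    have hcj : (if j < b then j else b) ≤ j := by split <;> [exact le_refl _; exact le_of_not_gt ‹_›]
    rcases List.mem_cons.1 hx with h' | h'
    · exact le_trans (ih _ _ (List.mem_cons_self)) (h' ▸ hcb)
    · rcases List.mem_cons.1 h' with h'' | h''
      · exact le_trans (ih _ _ (List.mem_cons_self)) (h'' ▸ hcj)
      · exact ih _ _ (List.mem_cons_of_mem _ h'')

theorem scanMin_le (pool : List (List Int)) (x : List Int) (hx : x ∈ pool) :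
    scanMin pool ≤ x := by
  cases pool with
  | nil => simp at hx
  | cons b rest => exact scanMin_le_aux rest b x hx

-- on a pool that is a permutation of a sorted m :: t, the linear scan finds m and
-- removal leaves a permutation of t
theorem minHead (m : List Int) (t pool : List (List Int))
    (hs : (m :: t).Pairwise (· ≤ ·)) (hp : (m :: t).Perm pool) :
    scanMin pool = m ∧ (removeFirst pool m).Perm t := by
  have hmp : m ∈ pool := hp.mem_iff.1 (List.mem_cons_self)
  have h1 : scanMin pool ≤ m := scanMin_le pool m hmp
  have h2 : m ≤ scanMin pool := by
    have hmem : scanMin pool ∈ m :: t :=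
      hp.mem_iff.2 (scanMin_mem pool (by intro h; rw [h] at hmp; simp at hmp))
    rcases List.mem_cons.1 hmem with h' | h'
    · rw [h']
    · exact (List.pairwise_cons.1 hs).1 _ h'
  refine ⟨le_antisymm h1 h2, ?_⟩
  rw [removeFirst, PySem.List.remove?_eq_some_erase _ _ hmp]
  simpa using (hp.symm.erase m).trans (by simp)

theorem heapPush_pairwise (heap : List (List Int)) (j : List Int)
    (h : heap.Pairwise (· ≤ ·)) : (heapPush heap j).Pairwise (· ≤ ·) :=
  List.Pairwise.orderedInsert j heap h

theorem foldl_heapPush (jobs : List (List Int)) :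
    ∀ acc : List (List Int), acc.Pairwise (· ≤ ·) →
      (jobs.foldl heapPush acc).Pairwise (· ≤ ·) ∧
      (jobs.foldl heapPush acc).Perm (acc ++ jobs) := by
  induction jobs with
  | nil => intro acc h; simp [h]
  | cons j jobs ih =>
    intro acc h
    have h1 := ih (heapPush acc j) (heapPush_pairwise acc j h)
    refine ⟨h1.1, ?_⟩
    refine h1.2.trans ?_
    have h2 : (heapPush acc j ++ jobs).Perm ((j :: acc) ++ jobs) :=
      (List.perm_orderedInsert _ j acc).append_right jobs
    exact h2.trans (by simpa using (List.perm_middle (a := j) (l₁ := acc) (l₂ := jobs)).symm)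

theorem loopAB (n : Nat) : ∀ (h pool : List (List Int)) (result answer : List Int),
    h.length = n → h.Pairwise (· ≤ ·) → h.Perm pool →
    loopA h result answer = loopB pool result answer := by
  induction n using Nat.strong_induction_on with
  | _ n ih =>
    intro h pool result answer hlen hsort hperm
    match h with
    | [] =>
      have : pool = [] := hperm.symm.eq_nil
      subst this
      rw [loopA, loopB]
      simp
    | [p1] =>
      have : pool = [p1] := List.perm_singleton.1 hperm.symm
      subst this
      rw [loopA, loopB]
      simp
    | p1 :: p2 :: rest =>
      have hn : n = rest.length + 2 := by simpa using hlen.symm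
      have hlp : pool.length = rest.length + 2 := by
        rw [← hperm.length_eq]; simp
      have hm1 := minHead p1 (p2 :: rest) pool hsort hperm
      have hsort2 : (p2 :: rest).Pairwise (· ≤ ·) := hsort.tail
      have hm2 := minHead p2 rest (removeFirst pool p1) hsort2 hm1.2.symm
      rw [loopA, loopB]
      rw [dif_pos (by omega)]
      simp only [hm1.1, hm2.1]
      have hrest : rest.Pairwise (· ≤ ·) := hsort2.tail
      have key : ∀ x : List Int,
          (heapPush rest x).Perm ((removeFirst (removeFirst pool p1) p2) ++ [x]) := by
        intro x
        have k1 : (heapPush rest x).Perm (x :: rest) := List.perm_orderedInsert _ x rest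
        have k2 : (x :: rest).Perm (rest ++ [x]) := by
          simpa using (List.perm_middle (a := x) (l₁ := rest) (l₂ := [])).symm
        exact (k1.trans k2).trans ((hm2.2.symm).append_right [x])
      have hlen' : ∀ x : List Int, (heapPush rest x).length = n - 1 := by
        intro x; simp [heapPush, List.orderedInsert_length]; omega
      split
      · exact ih (n - 1) (by omega) _ _ _ _ (hlen' p2)
          (heapPush_pairwise rest p2 hrest) (key p2)
      · exact ih (n - 1) (by omega) _ _ _ _ (hlen' p1)
          (heapPush_pairwise rest p1 hrest) (key p1)

theorem solution_eq (jobs : List (List Int)) : solution jobs = solution_alt jobs := by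
  match jobs with
  | [] => rfl
  | x :: xs =>
    have hfold := foldl_heapPush (x :: xs) [] (by simp)
    rw [solution, solution_alt]
    simp only at hfold ⊢
    match hh : (x :: xs).foldl heapPush [] with
    | [] =>
      exfalso
      have := hfold.2
      rw [hh] at this
      simpa using this.length_eq
    | first :: hrest =>
      rw [hh] at hfold
      have hperm : (first :: hrest).Perm (x :: xs) := by simpa using hfold.2
      have hm := minHead first hrest (x :: xs) hfold.1 hperm
      simp only [hm.1]
      rw [loopAB hrest.length hrest (removeFirst (x :: xs) first) _ _ rfl hfold.1.tail hm.2.symm]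

-- ===== VERDICT (by name: the statement is the Claim_ definition above) =====
theorem solution_spec : Claim_equal_solution := by
  intro jobs _ _
  unfold Spec_solution
  exact solution_eq jobs
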